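-- pv_equiv track=rewrite | github.com/oosadiaye/Quot-PSA | core/geolocation.py | detect_language_from_email
-- ===== SOURCE A (Python) =====
-- from typing import Optional, Dict
--
-- def detect_language_from_email(email: str) -> Optional[str]:
--     """
--     Detect language preference from email domain.
--     Useful for inferring language from company's country.
--     """
--     if not email or '@' not in email:
--         return None
--
--     domain = email.split('@')[1].lower()
--
--     # Common country-specific email domains
--     country_domains = {
--         '.ng': 'en',  # Nigeria
--         '.gh': 'en',  # Ghana
--         '.ke': 'en',  # Kenya
--         '.za': 'en',  # South Africa
--         '.uk': 'en',  # United Kingdom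
--         '.co.uk': 'en',
--         '.au': 'en',  # Australia
--         '.nz': 'en',  # New Zealand
--         '.ca': 'en',  # Canada
--         '.ie': 'en',  # Ireland
--         '.in': 'en',  # India
--
--         '.fr': 'fr',  # France
--         '.be': 'fr',  # Belgium
--         '.ci': 'fr',  # Ivory Coast
--         '.sn': 'fr',  # Senegal
--         '.cm': 'fr',  # Cameroon
--         '.ht': 'fr',  # Haiti
--
--         '.de': 'de',  # Germany
--         '.at': 'de',  # Austria
--         '.ch': 'de',  # Switzerland
--
--         '.es': 'es',  # Spain
--         '.mx': 'es',  # Mexico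
--         '.ar': 'es',  # Argentina
--         '.co': 'es',  # Colombia
--         '.pe': 'es',  # Peru
--         '.cl': 'es',  # Chile
--
--         '.br': 'pt',  # Brazil
--         '.pt': 'pt',  # Portugal
--
--         '.it': 'it',  # Italy
--
--         '.nl': 'nl',  # Netherlands
--
--         '.cn': 'zh',  # China
--         '.com.cn': 'zh',
--
--         '.jp': 'ja',  # Japan
--
--         '.kr': 'ko',  # Korea
--
--         '.ru': 'ru',  # Russia
--
--         '.ae': 'ar',  # UAE
--         '.sa': 'ar',  # Saudi Arabia
--         '.eg': 'ar',  # Egypt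
--         '.ma': 'ar',  # Morocco
--     }
--
--     for suffix, lang in country_domains.items():
--         if domain.endswith(suffix):
--             return lang
--
--     return None
-- ===== SOURCE B (Python) =====
-- from typing import Optional
--
-- # Every multi-label key in A's table ('.co.uk', '.com.cn') carries the same
-- # language as its final '.xx' suffix, which A tests earlier, so the answer is
-- # a function of the domain's last three characters alone.  The table is kept
-- # as language -> country-code groups and flattened into one lookup dict.
-- _GROUPS = [
--     ('en', ['ng', 'gh', 'ke', 'za', 'uk', 'au', 'nz', 'ca', 'ie', 'in']),
--     ('fr', ['fr', 'be', 'ci', 'sn', 'cm', 'ht']),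
--     ('de', ['de', 'at', 'ch']),
--     ('es', ['es', 'mx', 'ar', 'co', 'pe', 'cl']),
--     ('pt', ['br', 'pt']),
--     ('it', ['it']),
--     ('nl', ['nl']),
--     ('zh', ['cn']),
--     ('ja', ['jp']),
--     ('ko', ['kr']),
--     ('ru', ['ru']),
--     ('ar', ['ae', 'sa', 'eg', 'ma']),
-- ]
--
-- _LANG_BY_TAIL = {'.' + cc: lang for lang, ccs in _GROUPS for cc in ccs}
--
-- def detect_language_from_email(email: str) -> Optional[str]:
--     if not email or '@' not in email:
--         return None
--     domain = email.split('@')[1].lower()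
--     return _LANG_BY_TAIL.get(domain[-3:])
-- ===== Notes on version B (the rewrite author's own statement) =====
-- stated objective: idiomatic
-- what changed: Replaces A's linear scan over 39 dict entries testing domain.endswith(suffix) by a single dict lookup keyed on the domain's last three characters; the table is stored as language-to-country-code groups and flattened once (the two multi-label keys are redundant with their own '.xx' tails).
import Mathlib
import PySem

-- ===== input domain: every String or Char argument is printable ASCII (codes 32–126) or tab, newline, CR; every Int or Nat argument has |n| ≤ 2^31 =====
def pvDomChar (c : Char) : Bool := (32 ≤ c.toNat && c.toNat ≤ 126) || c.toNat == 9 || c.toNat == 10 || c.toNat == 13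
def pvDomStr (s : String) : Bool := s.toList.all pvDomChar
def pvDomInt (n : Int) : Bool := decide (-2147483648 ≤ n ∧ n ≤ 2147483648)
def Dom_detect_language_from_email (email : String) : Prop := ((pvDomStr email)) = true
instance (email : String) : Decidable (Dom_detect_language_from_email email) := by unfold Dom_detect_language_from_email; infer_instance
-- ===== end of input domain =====

-- B replaces A's 39-entry endswith scan by a single dict lookup keyed on the domain's
-- last three characters, built by flattening a language→country-code group table
-- (idiomatic; A's multi-label keys are redundant with their own '.xx' tails).

-- ===== PORT A =====
def pvCountryDomains : PySem.Dict String String := PySem.Dict.ofList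
  [(".ng", "en"), (".gh", "en"), (".ke", "en"), (".za", "en"), (".uk", "en"), (".co.uk", "en"), (".au", "en"), (".nz", "en"), (".ca", "en"), (".ie", "en"), (".in", "en"), (".fr", "fr"), (".be", "fr"), (".ci", "fr"), (".sn", "fr"), (".cm", "fr"), (".ht", "fr"), (".de", "de"), (".at", "de"), (".ch", "de"), (".es", "es"), (".mx", "es"), (".ar", "es"), (".co", "es"), (".pe", "es"), (".cl", "es"), (".br", "pt"), (".pt", "pt"), (".it", "it"), (".nl", "nl"), (".cn", "zh"), (".com.cn", "zh"), (".jp", "ja"), (".kr", "ko"), (".ru", "ru"), (".ae", "ar"), (".sa", "ar"), (".eg", "ar"), (".ma", "ar")]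

def pvScanA : List (String × String) → String → Option String
  | [], _ => none
  | (suffix, lang) :: rest, domain =>
      if PySem.Str.endswith domain suffix then some lang else pvScanA rest domain

def detect_language_from_email (email : String) : Option String :=
  if email = "" || !(PySem.Str.isIn "@" email) then none
  else
    match PySem.Str.split? email "@" with
    | none => none          -- unreachable: the separator "@" is nonempty
    | some parts =>
      match PySem.List.pyGet? parts 1 with
      | none => none        -- unreachable: '@' ∈ email gives ≥ 2 parts
      | some part => pvScanA (PySem.Dict.items pvCountryDomains) (PySem.Str.lower part)

-- ===== PORT B =====
-- Source B's _GROUPS: language → bare country codes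
def pvGroups : List (String × List String) :=
  [("en", ["ng", "gh", "ke", "za", "uk", "au", "nz", "ca", "ie", "in"]),
   ("fr", ["fr", "be", "ci", "sn", "cm", "ht"]),
   ("de", ["de", "at", "ch"]),
   ("es", ["es", "mx", "ar", "co", "pe", "cl"]),
   ("pt", ["br", "pt"]),
   ("it", ["it"]),
   ("nl", ["nl"]),
   ("zh", ["cn"]),
   ("ja", ["jp"]),
   ("ko", ["kr"]),
   ("ru", ["ru"]),
   ("ar", ["ae", "sa", "eg", "ma"])]

-- Source B's dict comprehension {'.' + cc: lang for lang, ccs in _GROUPS for cc in ccs}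
def pvLangByTail : PySem.Dict String String :=
  PySem.Dict.ofList (pvGroups.flatMap (fun g => g.2.map (fun cc => ("." ++ cc, g.1))))

def detect_language_from_email_alt (email : String) : Option String :=
  if email = "" || !(PySem.Str.isIn "@" email) then none
  else
    match PySem.Str.split? email "@" with
    | none => none          -- unreachable: the separator "@" is nonempty
    | some parts =>
      match PySem.List.pyGet? parts 1 with
      | none => none        -- unreachable: '@' ∈ email gives ≥ 2 parts
      | some part =>
        let domain := PySem.Str.lower part
        PySem.Dict.get? pvLangByTail (PySem.Str.slice domain (some (-3)) none)

-- ===== PRECONDITION & SPEC =====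
def Spec_detect_language_from_email (email : String) (out : Option String) : Prop := out = detect_language_from_email_alt email
instance (email : String) (out : Option String) : Decidable (Spec_detect_language_from_email email out) := by unfold Spec_detect_language_from_email; infer_instance

-- ===== CLAIM (what is proved, stated in full; the proofs are below) =====
def Claim_equal_detect_language_from_email : Prop := ∀ (email : String), Dom_detect_language_from_email email → Spec_detect_language_from_email email (detect_language_from_email email)

-- ===== LEMMAS AND PROOFS =====

-- domain[-3:] is always the last (up to) three characters
theorem pv_slice_last3 (l : List Char) :
    PySem.List.slice l (some (-3)) none = l.drop (l.length - 3) := by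
  simp [PySem.List.slice]

-- a 3-character string is a suffix of `domain` iff it equals domain[-3:]
theorem pv_endswith_eq (domain : String) (k : String) (hk : k.toList.length = 3) :
    PySem.Str.endswith domain k = (PySem.Str.slice domain (some (-3)) none == k) := by
  rw [PySem.Str.endswith_eq]
  rcases h : PySem.Chars.endswith domain.toList k.toList with _ | _
  · rw [eq_comm, beq_eq_false_iff_ne]
    intro hu
    rw [← Bool.not_eq_true, PySem.Chars.endswith_iff] at h
    apply h
    rw [List.suffix_iff_eq_drop, hk, ← String.toList_inj, PySem.Str.toList_slice,
        PySem.Chars.slice_eq_listSlice, pv_slice_last3] at *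
    exact hu.symm
  · rw [PySem.Chars.endswith_iff] at h
    rw [eq_comm, beq_iff_eq, ← String.toList_inj, PySem.Str.toList_slice,
        PySem.Chars.slice_eq_listSlice, pv_slice_last3]
    rw [List.suffix_iff_eq_drop, hk] at h
    exact h.symm

-- core: A's scan over the 39-entry table = B's lookup of domain[-3:]
set_option maxHeartbeats 1000000 in
set_option maxRecDepth 8192 in
theorem pv_core (domain : String) :
    pvScanA (PySem.Dict.items pvCountryDomains) domain
      = PySem.Dict.get? pvLangByTail (PySem.Str.slice domain (some (-3)) none) := by
  set u := PySem.Str.slice domain (some (-3)) none with hu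
  have e1 : PySem.Str.endswith domain ".ng" = ((".ng" : String) == u) := (pv_endswith_eq domain ".ng" (by decide)).trans Bool.beq_comm
  have e2 : PySem.Str.endswith domain ".gh" = ((".gh" : String) == u) := (pv_endswith_eq domain ".gh" (by decide)).trans Bool.beq_comm
  have e3 : PySem.Str.endswith domain ".ke" = ((".ke" : String) == u) := (pv_endswith_eq domain ".ke" (by decide)).trans Bool.beq_comm
  have e4 : PySem.Str.endswith domain ".za" = ((".za" : String) == u) := (pv_endswith_eq domain ".za" (by decide)).trans Bool.beq_comm
  have e5 : PySem.Str.endswith domain ".uk" = ((".uk" : String) == u) := (pv_endswith_eq domain ".uk" (by decide)).trans Bool.beq_comm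
  have e6 : PySem.Str.endswith domain ".au" = ((".au" : String) == u) := (pv_endswith_eq domain ".au" (by decide)).trans Bool.beq_comm
  have e7 : PySem.Str.endswith domain ".nz" = ((".nz" : String) == u) := (pv_endswith_eq domain ".nz" (by decide)).trans Bool.beq_comm
  have e8 : PySem.Str.endswith domain ".ca" = ((".ca" : String) == u) := (pv_endswith_eq domain ".ca" (by decide)).trans Bool.beq_comm
  have e9 : PySem.Str.endswith domain ".ie" = ((".ie" : String) == u) := (pv_endswith_eq domain ".ie" (by decide)).trans Bool.beq_comm
  have e10 : PySem.Str.endswith domain ".in" = ((".in" : String) == u) := (pv_endswith_eq domain ".in" (by decide)).trans Bool.beq_comm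
  have e11 : PySem.Str.endswith domain ".fr" = ((".fr" : String) == u) := (pv_endswith_eq domain ".fr" (by decide)).trans Bool.beq_comm
  have e12 : PySem.Str.endswith domain ".be" = ((".be" : String) == u) := (pv_endswith_eq domain ".be" (by decide)).trans Bool.beq_comm
  have e13 : PySem.Str.endswith domain ".ci" = ((".ci" : String) == u) := (pv_endswith_eq domain ".ci" (by decide)).trans Bool.beq_comm
  have e14 : PySem.Str.endswith domain ".sn" = ((".sn" : String) == u) := (pv_endswith_eq domain ".sn" (by decide)).trans Bool.beq_comm
  have e15 : PySem.Str.endswith domain ".cm" = ((".cm" : String) == u) := (pv_endswith_eq domain ".cm" (by decide)).trans Bool.beq_comm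
  have e16 : PySem.Str.endswith domain ".ht" = ((".ht" : String) == u) := (pv_endswith_eq domain ".ht" (by decide)).trans Bool.beq_comm
  have e17 : PySem.Str.endswith domain ".de" = ((".de" : String) == u) := (pv_endswith_eq domain ".de" (by decide)).trans Bool.beq_comm
  have e18 : PySem.Str.endswith domain ".at" = ((".at" : String) == u) := (pv_endswith_eq domain ".at" (by decide)).trans Bool.beq_comm
  have e19 : PySem.Str.endswith domain ".ch" = ((".ch" : String) == u) := (pv_endswith_eq domain ".ch" (by decide)).trans Bool.beq_comm
  have e20 : PySem.Str.endswith domain ".es" = ((".es" : String) == u) := (pv_endswith_eq domain ".es" (by decide)).trans Bool.beq_comm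
  have e21 : PySem.Str.endswith domain ".mx" = ((".mx" : String) == u) := (pv_endswith_eq domain ".mx" (by decide)).trans Bool.beq_comm
  have e22 : PySem.Str.endswith domain ".ar" = ((".ar" : String) == u) := (pv_endswith_eq domain ".ar" (by decide)).trans Bool.beq_comm
  have e23 : PySem.Str.endswith domain ".co" = ((".co" : String) == u) := (pv_endswith_eq domain ".co" (by decide)).trans Bool.beq_comm
  have e24 : PySem.Str.endswith domain ".pe" = ((".pe" : String) == u) := (pv_endswith_eq domain ".pe" (by decide)).trans Bool.beq_comm
  have e25 : PySem.Str.endswith domain ".cl" = ((".cl" : String) == u) := (pv_endswith_eq domain ".cl" (by decide)).trans Bool.beq_comm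
  have e26 : PySem.Str.endswith domain ".br" = ((".br" : String) == u) := (pv_endswith_eq domain ".br" (by decide)).trans Bool.beq_comm
  have e27 : PySem.Str.endswith domain ".pt" = ((".pt" : String) == u) := (pv_endswith_eq domain ".pt" (by decide)).trans Bool.beq_comm
  have e28 : PySem.Str.endswith domain ".it" = ((".it" : String) == u) := (pv_endswith_eq domain ".it" (by decide)).trans Bool.beq_comm
  have e29 : PySem.Str.endswith domain ".nl" = ((".nl" : String) == u) := (pv_endswith_eq domain ".nl" (by decide)).trans Bool.beq_comm
  have e30 : PySem.Str.endswith domain ".cn" = ((".cn" : String) == u) := (pv_endswith_eq domain ".cn" (by decide)).trans Bool.beq_comm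
  have e31 : PySem.Str.endswith domain ".jp" = ((".jp" : String) == u) := (pv_endswith_eq domain ".jp" (by decide)).trans Bool.beq_comm
  have e32 : PySem.Str.endswith domain ".kr" = ((".kr" : String) == u) := (pv_endswith_eq domain ".kr" (by decide)).trans Bool.beq_comm
  have e33 : PySem.Str.endswith domain ".ru" = ((".ru" : String) == u) := (pv_endswith_eq domain ".ru" (by decide)).trans Bool.beq_comm
  have e34 : PySem.Str.endswith domain ".ae" = ((".ae" : String) == u) := (pv_endswith_eq domain ".ae" (by decide)).trans Bool.beq_comm
  have e35 : PySem.Str.endswith domain ".sa" = ((".sa" : String) == u) := (pv_endswith_eq domain ".sa" (by decide)).trans Bool.beq_comm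
  have e36 : PySem.Str.endswith domain ".eg" = ((".eg" : String) == u) := (pv_endswith_eq domain ".eg" (by decide)).trans Bool.beq_comm
  have e37 : PySem.Str.endswith domain ".ma" = ((".ma" : String) == u) := (pv_endswith_eq domain ".ma" (by decide)).trans Bool.beq_comm
  have hA : PySem.Dict.items pvCountryDomains = [(".ng", "en"), (".gh", "en"), (".ke", "en"), (".za", "en"), (".uk", "en"), (".co.uk", "en"), (".au", "en"), (".nz", "en"), (".ca", "en"), (".ie", "en"), (".in", "en"), (".fr", "fr"), (".be", "fr"), (".ci", "fr"), (".sn", "fr"), (".cm", "fr"), (".ht", "fr"), (".de", "de"), (".at", "de"), (".ch", "de"), (".es", "es"), (".mx", "es"), (".ar", "es"), (".co", "es"), (".pe", "es"), (".cl", "es"), (".br", "pt"), (".pt", "pt"), (".it", "it"), (".nl", "nl"), (".cn", "zh"), (".com.cn", "zh"), (".jp", "ja"), (".kr", "ko"), (".ru", "ru"), (".ae", "ar"), (".sa", "ar"), (".eg", "ar"), (".ma", "ar")] := by decide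
  have hB : pvLangByTail = PySem.Dict.mk [(".ng", "en"), (".gh", "en"), (".ke", "en"), (".za", "en"), (".uk", "en"), (".au", "en"), (".nz", "en"), (".ca", "en"), (".ie", "en"), (".in", "en"), (".fr", "fr"), (".be", "fr"), (".ci", "fr"), (".sn", "fr"), (".cm", "fr"), (".ht", "fr"), (".de", "de"), (".at", "de"), (".ch", "de"), (".es", "es"), (".mx", "es"), (".ar", "es"), (".co", "es"), (".pe", "es"), (".cl", "es"), (".br", "pt"), (".pt", "pt"), (".it", "it"), (".nl", "nl"), (".cn", "zh"), (".jp", "ja"), (".kr", "ko"), (".ru", "ru"), (".ae", "ar"), (".sa", "ar"), (".eg", "ar"), (".ma", "ar")] := by decide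
  rw [hA, hB]
  simp only [pvScanA, PySem.Dict.get?, List.find?_cons, List.find?_nil]
  simp only [e1, e2, e3, e4, e5, e6, e7, e8, e9, e10, e11, e12, e13, e14, e15, e16, e17, e18, e19, e20, e21, e22, e23, e24, e25, e26, e27, e28, e29, e30, e31, e32, e33, e34, e35, e36, e37]
  by_cases h1 : ((".ng" : String) == u) = true
  · simp [h1]
  rw [Bool.not_eq_true] at h1
  by_cases h2 : ((".gh" : String) == u) = true
  · simp [h1, h2]
  rw [Bool.not_eq_true] at h2
  by_cases h3 : ((".ke" : String) == u) = true
  · simp [h1, h2, h3]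
  rw [Bool.not_eq_true] at h3
  by_cases h4 : ((".za" : String) == u) = true
  · simp [h1, h2, h3, h4]
  rw [Bool.not_eq_true] at h4
  by_cases h5 : ((".uk" : String) == u) = true
  · simp [h1, h2, h3, h4, h5]
  rw [Bool.not_eq_true] at h5
  have hcof : PySem.Chars.endswith domain.toList ['.', 'c', 'o', '.', 'u', 'k'] = false := by
    rcases hx : PySem.Chars.endswith domain.toList ['.', 'c', 'o', '.', 'u', 'k'] with _ | _
    · rfl
    · exfalso
      have hy : PySem.Str.endswith domain ".uk" = true := by
        rw [PySem.Str.endswith_eq]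
        show PySem.Chars.endswith domain.toList ['.', 'u', 'k'] = true
        rw [PySem.Chars.endswith_iff] at hx ⊢
        exact List.IsSuffix.trans (by decide) hx
      rw [e5, h5] at hy
      exact Bool.noConfusion hy
  by_cases h6 : ((".au" : String) == u) = true
  · simp [h1, h2, h3, h4, h5, hcof, h6]
  rw [Bool.not_eq_true] at h6
  by_cases h7 : ((".nz" : String) == u) = true
  · simp [h1, h2, h3, h4, h5, h6, hcof, h7]
  rw [Bool.not_eq_true] at h7
  by_cases h8 : ((".ca" : String) == u) = true
  · simp [h1, h2, h3, h4, h5, h6, h7, hcof, h8]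
  rw [Bool.not_eq_true] at h8
  by_cases h9 : ((".ie" : String) == u) = true
  · simp [h1, h2, h3, h4, h5, h6, h7, h8, hcof, h9]
  rw [Bool.not_eq_true] at h9
  by_cases h10 : ((".in" : String) == u) = true
  · simp [h1, h2, h3, h4, h5, h6, h7, h8, h9, hcof, h10]
  rw [Bool.not_eq_true] at h10
  by_cases h11 : ((".fr" : String) == u) = true
  · simp [h1, h2, h3, h4, h5, h6, h7, h8, h9, h10, hcof, h11]
  rw [Bool.not_eq_true] at h11
  by_cases h12 : ((".be" : String) == u) = true
  · simp [h1, h2, h3, h4, h5, h6, h7, h8, h9, h10, h11, hcof, h12]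
  rw [Bool.not_eq_true] at h12
  by_cases h13 : ((".ci" : String) == u) = true
  · simp [h1, h2, h3, h4, h5, h6, h7, h8, h9, h10, h11, h12, hcof, h13]
  rw [Bool.not_eq_true] at h13
  by_cases h14 : ((".sn" : String) == u) = true
  · simp [h1, h2, h3, h4, h5, h6, h7, h8, h9, h10, h11, h12, h13, hcof, h14]
  rw [Bool.not_eq_true] at h14
  by_cases h15 : ((".cm" : String) == u) = true
  · simp [h1, h2, h3, h4, h5, h6, h7, h8, h9, h10, h11, h12, h13, h14, hcof, h15]
  rw [Bool.not_eq_true] at h15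
  by_cases h16 : ((".ht" : String) == u) = true
  · simp [h1, h2, h3, h4, h5, h6, h7, h8, h9, h10, h11, h12, h13, h14, h15, hcof, h16]
  rw [Bool.not_eq_true] at h16
  by_cases h17 : ((".de" : String) == u) = true
  · simp [h1, h2, h3, h4, h5, h6, h7, h8, h9, h10, h11, h12, h13, h14, h15, h16, hcof, h17]
  rw [Bool.not_eq_true] at h17
  by_cases h18 : ((".at" : String) == u) = true
  · simp [h1, h2, h3, h4, h5, h6, h7, h8, h9, h10, h11, h12, h13, h14, h15, h16, h17, hcof, h18]
  rw [Bool.not_eq_true] at h18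
  by_cases h19 : ((".ch" : String) == u) = true
  · simp [h1, h2, h3, h4, h5, h6, h7, h8, h9, h10, h11, h12, h13, h14, h15, h16, h17, h18, hcof, h19]
  rw [Bool.not_eq_true] at h19
  by_cases h20 : ((".es" : String) == u) = true
  · simp [h1, h2, h3, h4, h5, h6, h7, h8, h9, h10, h11, h12, h13, h14, h15, h16, h17, h18, h19, hcof, h20]
  rw [Bool.not_eq_true] at h20
  by_cases h21 : ((".mx" : String) == u) = true
  · simp [h1, h2, h3, h4, h5, h6, h7, h8, h9, h10, h11, h12, h13, h14, h15, h16, h17, h18, h19, h20, hcof, h21]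
  rw [Bool.not_eq_true] at h21
  by_cases h22 : ((".ar" : String) == u) = true
  · simp [h1, h2, h3, h4, h5, h6, h7, h8, h9, h10, h11, h12, h13, h14, h15, h16, h17, h18, h19, h20, h21, hcof, h22]
  rw [Bool.not_eq_true] at h22
  by_cases h23 : ((".co" : String) == u) = true
  · simp [h1, h2, h3, h4, h5, h6, h7, h8, h9, h10, h11, h12, h13, h14, h15, h16, h17, h18, h19, h20, h21, h22, hcof, h23]
  rw [Bool.not_eq_true] at h23
  by_cases h24 : ((".pe" : String) == u) = true
  · simp [h1, h2, h3, h4, h5, h6, h7, h8, h9, h10, h11, h12, h13, h14, h15, h16, h17, h18, h19, h20, h21, h22, h23, hcof, h24]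
  rw [Bool.not_eq_true] at h24
  by_cases h25 : ((".cl" : String) == u) = true
  · simp [h1, h2, h3, h4, h5, h6, h7, h8, h9, h10, h11, h12, h13, h14, h15, h16, h17, h18, h19, h20, h21, h22, h23, h24, hcof, h25]
  rw [Bool.not_eq_true] at h25
  by_cases h26 : ((".br" : String) == u) = true
  · simp [h1, h2, h3, h4, h5, h6, h7, h8, h9, h10, h11, h12, h13, h14, h15, h16, h17, h18, h19, h20, h21, h22, h23, h24, h25, hcof, h26]
  rw [Bool.not_eq_true] at h26
  by_cases h27 : ((".pt" : String) == u) = true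
  · simp [h1, h2, h3, h4, h5, h6, h7, h8, h9, h10, h11, h12, h13, h14, h15, h16, h17, h18, h19, h20, h21, h22, h23, h24, h25, h26, hcof, h27]
  rw [Bool.not_eq_true] at h27
  by_cases h28 : ((".it" : String) == u) = true
  · simp [h1, h2, h3, h4, h5, h6, h7, h8, h9, h10, h11, h12, h13, h14, h15, h16, h17, h18, h19, h20, h21, h22, h23, h24, h25, h26, h27, hcof, h28]
  rw [Bool.not_eq_true] at h28
  by_cases h29 : ((".nl" : String) == u) = true
  · simp [h1, h2, h3, h4, h5, h6, h7, h8, h9, h10, h11, h12, h13, h14, h15, h16, h17, h18, h19, h20, h21, h22, h23, h24, h25, h26, h27, h28, hcof, h29]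
  rw [Bool.not_eq_true] at h29
  by_cases h30 : ((".cn" : String) == u) = true
  · simp [h1, h2, h3, h4, h5, h6, h7, h8, h9, h10, h11, h12, h13, h14, h15, h16, h17, h18, h19, h20, h21, h22, h23, h24, h25, h26, h27, h28, h29, hcof, h30]
  rw [Bool.not_eq_true] at h30
  have hcmf : PySem.Chars.endswith domain.toList ['.', 'c', 'o', 'm', '.', 'c', 'n'] = false := by
    rcases hx : PySem.Chars.endswith domain.toList ['.', 'c', 'o', 'm', '.', 'c', 'n'] with _ | _
    · rfl
    · exfalso
      have hy : PySem.Str.endswith domain ".cn" = true := by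
        rw [PySem.Str.endswith_eq]
        show PySem.Chars.endswith domain.toList ['.', 'c', 'n'] = true
        rw [PySem.Chars.endswith_iff] at hx ⊢
        exact List.IsSuffix.trans (by decide) hx
      rw [e30, h30] at hy
      exact Bool.noConfusion hy
  by_cases h31 : ((".jp" : String) == u) = true
  · simp [h1, h2, h3, h4, h5, h6, h7, h8, h9, h10, h11, h12, h13, h14, h15, h16, h17, h18, h19, h20, h21, h22, h23, h24, h25, h26, h27, h28, h29, h30, hcof, hcmf, h31]
  rw [Bool.not_eq_true] at h31
  by_cases h32 : ((".kr" : String) == u) = true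
  · simp [h1, h2, h3, h4, h5, h6, h7, h8, h9, h10, h11, h12, h13, h14, h15, h16, h17, h18, h19, h20, h21, h22, h23, h24, h25, h26, h27, h28, h29, h30, h31, hcof, hcmf, h32]
  rw [Bool.not_eq_true] at h32
  by_cases h33 : ((".ru" : String) == u) = true
  · simp [h1, h2, h3, h4, h5, h6, h7, h8, h9, h10, h11, h12, h13, h14, h15, h16, h17, h18, h19, h20, h21, h22, h23, h24, h25, h26, h27, h28, h29, h30, h31, h32, hcof, hcmf, h33]
  rw [Bool.not_eq_true] at h33
  by_cases h34 : ((".ae" : String) == u) = true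
  · simp [h1, h2, h3, h4, h5, h6, h7, h8, h9, h10, h11, h12, h13, h14, h15, h16, h17, h18, h19, h20, h21, h22, h23, h24, h25, h26, h27, h28, h29, h30, h31, h32, h33, hcof, hcmf, h34]
  rw [Bool.not_eq_true] at h34
  by_cases h35 : ((".sa" : String) == u) = true
  · simp [h1, h2, h3, h4, h5, h6, h7, h8, h9, h10, h11, h12, h13, h14, h15, h16, h17, h18, h19, h20, h21, h22, h23, h24, h25, h26, h27, h28, h29, h30, h31, h32, h33, h34, hcof, hcmf, h35]
  rw [Bool.not_eq_true] at h35
  by_cases h36 : ((".eg" : String) == u) = true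
  · simp [h1, h2, h3, h4, h5, h6, h7, h8, h9, h10, h11, h12, h13, h14, h15, h16, h17, h18, h19, h20, h21, h22, h23, h24, h25, h26, h27, h28, h29, h30, h31, h32, h33, h34, h35, hcof, hcmf, h36]
  rw [Bool.not_eq_true] at h36
  by_cases h37 : ((".ma" : String) == u) = true
  · simp [h1, h2, h3, h4, h5, h6, h7, h8, h9, h10, h11, h12, h13, h14, h15, h16, h17, h18, h19, h20, h21, h22, h23, h24, h25, h26, h27, h28, h29, h30, h31, h32, h33, h34, h35, h36, hcof, hcmf, h37]
  rw [Bool.not_eq_true] at h37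
  simp [h1, h2, h3, h4, h5, h6, h7, h8, h9, h10, h11, h12, h13, h14, h15, h16, h17, h18, h19, h20, h21, h22, h23, h24, h25, h26, h27, h28, h29, h30, h31, h32, h33, h34, h35, h36, h37, hcof, hcmf]

-- ===== VERDICT (by name: the statement is the Claim_ definition above) =====
set_option maxRecDepth 8192 in
theorem detect_language_from_email_spec : Claim_equal_detect_language_from_email := by
  intro email _
  simp only [Spec_detect_language_from_email, detect_language_from_email,
    detect_language_from_email_alt]
  split
  · rfl
  · split
    · rfl
    · split
      · rfl
      · exact pv_core _
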